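-- pv_equiv track=rewrite | github.com/Sondreespe/Snake | tester.py | maks_score
-- ===== SOURCE A (Python) =====
-- def maks_score(board):
--     max_row = 0
--     max_col = 0
--     for i in range(len(board)):
--         max_row += 1
--     for a in range(len(board[0])):
--         max_col += 1
--     n_cells = max_col*max_row
--     return(n_cells)
-- ===== SOURCE B (Python) =====
-- def maks_score(board):
--     return len(board) * len(board[0])
-- ===== Notes on version B (the rewrite author's own statement) =====
-- stated objective: simpler
-- what changed: Replaces the two counting loops (incrementing per row and per column) with the closed form len(board)*len(board[0]).
import Mathlib
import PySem

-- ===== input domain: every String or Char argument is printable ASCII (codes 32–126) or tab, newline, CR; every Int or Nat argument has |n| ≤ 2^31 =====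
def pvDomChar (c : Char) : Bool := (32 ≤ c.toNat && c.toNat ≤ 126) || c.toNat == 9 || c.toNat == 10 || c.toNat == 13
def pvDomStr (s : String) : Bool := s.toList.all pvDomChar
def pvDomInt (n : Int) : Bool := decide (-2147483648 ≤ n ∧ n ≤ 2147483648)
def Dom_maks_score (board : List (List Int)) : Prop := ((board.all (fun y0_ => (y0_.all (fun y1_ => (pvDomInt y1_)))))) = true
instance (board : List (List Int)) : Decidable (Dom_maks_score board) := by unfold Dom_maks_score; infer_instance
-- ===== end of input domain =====

-- B replaces A's two counting loops by the closed form len(board)*len(board[0]); both raise on an empty board.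
-- ===== PORT A =====
def maks_score (board : List (List Int)) : Int :=
  let max_row : Int := 0
  let max_col : Int := 0
  let max_row := (PySem.List.pyRange 0 (board.length) 1).foldl (fun acc _ => acc + 1) max_row
  -- board[0]: Pre_ guarantees the board is nonempty, so pyGet? is some; getD [] never fires inside Pre_
  let row0 := (PySem.List.pyGet? board 0).getD []
  let max_col := (PySem.List.pyRange 0 (row0.length) 1).foldl (fun acc _ => acc + 1) max_col
  max_col * max_row

-- ===== PORT B =====
def maks_score_alt (board : List (List Int)) : Int :=
  (board.length : Int) * (((PySem.List.pyGet? board 0).getD []).length : Int)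

-- ===== PRECONDITION & SPEC =====
-- Pre_ excludes the empty board, on which both A and B raise IndexError at board[0].
def Pre_maks_score (board : List (List Int)) : Prop := board ≠ []
instance (board : List (List Int)) : Decidable (Pre_maks_score board) := by unfold Pre_maks_score; infer_instance
def pvWitness_maks_score : List (List Int) := [[1, 2], [3, 4]]
def Spec_maks_score (board : List (List Int)) (out : Int) : Prop := out = maks_score_alt board
instance (board : List (List Int)) (out : Int) : Decidable (Spec_maks_score board out) := by unfold Spec_maks_score; infer_instance

-- ===== CLAIM (what is proved, stated in full; the proofs are below) =====
def Claim_equal_maks_score : Prop := ∀ (board : List (List Int)), Dom_maks_score board → Pre_maks_score board → Spec_maks_score board (maks_score board)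

-- ===== LEMMAS AND PROOFS =====

-- ===== VERDICT (by name: the statement is the Claim_ definition above) =====
-- an increment-per-element fold is start + length
theorem foldl_count {α : Type} (l : List α) (c : Int) :
    l.foldl (fun acc _ => acc + 1) c = c + l.length := by
  induction l generalizing c with
  | nil => simp
  | cons x xs ih => simp [List.foldl_cons, ih]; omega

theorem maks_score_spec : Claim_equal_maks_score := by
  intro board _ hpre
  unfold Spec_maks_score maks_score maks_score_alt
  simp only []
  rw [foldl_count, foldl_count]
  simp [PySem.List.length_pyRange_one]
  ring
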